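-- pv_equiv track=rewrite | github.com/thdehdx/pycharm | level2/주식가격.py | solution
-- ===== SOURCE A (Python) =====
-- def solution(w,h):
--     answer = 1
--     full=w*h
--     #최대공약수
--     gcm=1
--     for k in range(2,min(w,h)+1):
--         while(w%k==0)&(h%k==0):
--             w=w//k
--             h=h//k
--             gcm=gcm*k
--             continue
--     ###########
--     trash=w+h-1
--     trash*=gcm
--     answer=full-trash
--     return answer
-- ===== SOURCE B (Python) =====
-- def solution(w, h):
--     # Euclidean algorithm instead of A's trial-division factor loop; the
--     # reduced-rectangle arithmetic folds to the closed form w*h - w - h + g.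
--     # The common factor g is only meaningful for positive grid dimensions;
--     # otherwise nothing can be divided out and g is 1.
--     g = 1
--     if w > 0 and h > 0:
--         a, b = w, h
--         while b:
--             a, b = b, a % b
--         g = a
--     return w * h - w - h + g
-- ===== Notes on version B (the rewrite author's own statement) =====
-- stated objective: faster
-- what changed: Replaces the trial-division loop over all candidate factors 2..min(w,h) (with repeated exact divisions) by the Euclidean gcd algorithm for positive dimensions (g=1 otherwise, where A's loop body never runs), and folds the reduced-rectangle arithmetic into the closed form w*h - w - h + g.
import Mathlib
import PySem

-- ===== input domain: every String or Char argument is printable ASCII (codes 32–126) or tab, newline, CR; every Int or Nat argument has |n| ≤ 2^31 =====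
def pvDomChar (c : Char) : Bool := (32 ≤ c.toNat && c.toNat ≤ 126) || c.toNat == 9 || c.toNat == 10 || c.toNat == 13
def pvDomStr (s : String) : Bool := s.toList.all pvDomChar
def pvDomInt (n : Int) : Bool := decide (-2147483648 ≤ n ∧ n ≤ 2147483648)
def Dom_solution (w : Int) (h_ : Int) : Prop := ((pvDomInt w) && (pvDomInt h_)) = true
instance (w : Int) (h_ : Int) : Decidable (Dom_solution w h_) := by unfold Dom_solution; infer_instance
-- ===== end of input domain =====

-- B replaces A's trial-division factor loop by the Euclidean gcd algorithm (run only for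
-- positive dimensions, where reduction is meaningful) and the closed form w*h - w - h + g.

-- ===== PORT A =====
-- inner `while (w%k==0)&(h%k==0): w//=k; h//=k; gcm*=k` ; fuel only makes it total,
-- on Pre_ inputs the fuel passed below is proved sufficient
def solWhile (k : Int) : Nat → Int × Int × Int → Int × Int × Int
  | 0, s => s
  | fuel+1, (w, h, g) =>
    if PySem.Int.mod w k = 0 ∧ PySem.Int.mod h k = 0 then
      solWhile k fuel (PySem.Int.floordiv w k, PySem.Int.floordiv h k, g * k)
    else (w, h, g)

def solution (w : Int) (h_ : Int) : Int :=
  let full := w * h_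
  let s := (PySem.List.pyRange 2 (min w h_ + 1) 1).foldl
      (fun (s : Int × Int × Int) k => solWhile k (s.1.natAbs + 1) s) (w, h_, 1)
  let trash := (s.1 + s.2.1 - 1) * s.2.2
  full - trash

-- ===== PORT B =====
-- termination helper for the Euclidean loop (cited by `decreasing_by`)
theorem pymod_natAbs_lt (a b : Int) (hb : b ≠ 0) :
    (PySem.Int.mod a b).natAbs < b.natAbs := by
  rcases lt_or_gt_of_ne hb with h | h
  · have := PySem.Int.mod_neg_bounds a h
    omega
  · have h1 := PySem.Int.mod_nonneg a h
    have h2 := PySem.Int.mod_lt a h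
    omega

-- `while b: a, b = b, a % b`
def euclid (a b : Int) : Int :=
  if hb : b = 0 then a
  else euclid b (PySem.Int.mod a b)
termination_by b.natAbs
decreasing_by exact pymod_natAbs_lt a b hb

def solution_alt (w : Int) (h_ : Int) : Int :=
  let g := if 0 < w ∧ 0 < h_ then euclid w h_ else 1
  w * h_ - w - h_ + g

-- ===== PRECONDITION & SPEC =====
def Spec_solution (w : Int) (h_ : Int) (out : Int) : Prop := out = solution_alt w h_
instance (w : Int) (h_ : Int) (out : Int) : Decidable (Spec_solution w h_ out) := by unfold Spec_solution; infer_instance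

-- ===== CLAIM (what is proved, stated in full; the proofs are below) =====
def Claim_equal_solution : Prop := ∀ (w : Int) (h_ : Int), Dom_solution w h_ → Spec_solution w h_ (solution w h_)

-- ===== LEMMAS AND PROOFS =====

def LoopInv (w h : Int) (t : Int) (s : Int × Int × Int) : Prop :=
  1 ≤ s.1 ∧ 1 ≤ s.2.1 ∧ 1 ≤ s.2.2 ∧ s.2.2 * s.1 = w ∧ s.2.2 * s.2.1 = h ∧
  ∀ j : Int, 2 ≤ j → j < t → ¬(j ∣ s.1 ∧ j ∣ s.2.1)

theorem euclid_eq_gcd (n : Nat) : ∀ a b : Int, b.natAbs ≤ n → 0 < a → 0 ≤ b →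
    euclid a b = Int.gcd a b := by
  induction n with
  | zero =>
    intro a b hn ha hb
    have hb0 : b = 0 := by omega
    subst hb0
    rw [euclid]
    simp [Int.natAbs_of_nonneg ha.le]
  | succ n ih =>
    intro a b hn ha hb
    by_cases h0 : b = 0
    · subst h0
      rw [euclid]
      simp [Int.natAbs_of_nonneg ha.le]
    · have hbpos : 0 < b := lt_of_le_of_ne hb (Ne.symm h0)
      have hm1 : 0 ≤ a % b := Int.emod_nonneg a h0
      have hm2 : a % b < b := Int.emod_lt_of_pos a hbpos
      rw [euclid]
      simp only [h0, dite_false]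
      rw [PySem.Int.mod_eq_emod_of_pos hbpos]
      rw [ih b (a % b) (by omega) hbpos hm1]
      congr 1
      rw [Int.emod_def, Int.gcd_sub_mul_left_right, Int.gcd_comm]

-- the inner while loop: with enough fuel it terminates with the factor k fully divided out
theorem solWhile_spec (k : Int) (hk : 2 ≤ k) :
    ∀ (fuel : Nat) (wc hc g : Int), 1 ≤ wc → 1 ≤ hc → 1 ≤ g → wc.natAbs ≤ fuel →
    ∃ w' h' g', solWhile k fuel (wc, hc, g) = (w', h', g') ∧
      1 ≤ w' ∧ 1 ≤ h' ∧ 1 ≤ g' ∧ w' ∣ wc ∧ h' ∣ hc ∧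
      g' * w' = g * wc ∧ g' * h' = g * hc ∧ ¬(k ∣ w' ∧ k ∣ h') := by
  intro fuel
  induction fuel with
  | zero =>
    intro wc hc g hw hh hg hf
    exfalso; omega
  | succ fuel ih =>
    intro wc hc g hw hh hg hf
    have hkpos : (0:Int) < k := by omega
    rw [solWhile]
    by_cases hcnd : PySem.Int.mod wc k = 0 ∧ PySem.Int.mod hc k = 0
    · rw [if_pos hcnd]
      have hdw : k ∣ wc := (PySem.Int.mod_eq_zero_iff_dvd wc k).mp hcnd.1
      have hdh : k ∣ hc := (PySem.Int.mod_eq_zero_iff_dvd hc k).mp hcnd.2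
      rw [PySem.Int.floordiv_eq_ediv_of_pos hkpos, PySem.Int.floordiv_eq_ediv_of_pos hkpos]
      have hwk : wc / k * k = wc := Int.ediv_mul_cancel hdw
      have hhk : hc / k * k = hc := Int.ediv_mul_cancel hdh
      have hw1 : 1 ≤ wc / k := by nlinarith [hwk]
      have hh1 : 1 ≤ hc / k := by nlinarith [hhk]
      have hlt : wc / k < wc := by nlinarith [hwk]
      obtain ⟨w', h', g', heq, p1, p2, p3, p4, p5, p6, p7, p8⟩ :=
        ih (wc / k) (hc / k) (g * k) hw1 hh1 (by nlinarith) (by omega)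
      refine ⟨w', h', g', heq, p1, p2, p3, p4.trans ⟨k, hwk.symm⟩, p5.trans ⟨k, hhk.symm⟩, ?_, ?_, p8⟩
      · calc g' * w' = g * k * (wc / k) := p6
          _ = g * (wc / k * k) := by ring
          _ = g * wc := by rw [hwk]
      · calc g' * h' = g * k * (hc / k) := p7
          _ = g * (hc / k * k) := by ring
          _ = g * hc := by rw [hhk]
    · rw [if_neg hcnd]
      refine ⟨wc, hc, g, rfl, hw, hh, hg, dvd_refl _, dvd_refl _, rfl, rfl, ?_⟩
      rintro ⟨d1, d2⟩
      exact hcnd ⟨(PySem.Int.mod_eq_zero_iff_dvd wc k).mpr d1,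
                  (PySem.Int.mod_eq_zero_iff_dvd hc k).mpr d2⟩

theorem fold_inv (w h : Int) : ∀ (n : Nat) (a b : Int) (s : Int × Int × Int), 2 ≤ a →
    b - a ≤ (n : Int) → LoopInv w h a s →
    LoopInv w h (max a b) ((PySem.List.pyRange a b 1).foldl
      (fun (s : Int × Int × Int) k => solWhile k (s.1.natAbs + 1) s) s) := by
  intro n
  induction n with
  | zero =>
    intro a b s ha hn hs
    have hba : b ≤ a := by omega
    rw [PySem.List.pyRange_one_eq_nil hba, List.foldl_nil, max_eq_left hba]
    exact hs
  | succ n ih =>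
    intro a b s ha hn hs
    by_cases hba : b ≤ a
    · rw [PySem.List.pyRange_one_eq_nil hba, List.foldl_nil, max_eq_left hba]
      exact hs
    · have hba' : a < b := lt_of_not_ge hba
      rw [PySem.List.pyRange_one_cons hba', List.foldl_cons]
      obtain ⟨hw1, hh1, hg1, hpw, hph, hdvd⟩ := hs
      obtain ⟨w', h', g', heq, p1, p2, p3, p4, p5, p6, p7, p8⟩ :=
        solWhile_spec a ha (s.1.natAbs + 1) s.1 s.2.1 s.2.2 hw1 hh1 hg1 (by omega)
      have hstep : solWhile a (s.1.natAbs + 1) s = (w', h', g') := heq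
      rw [hstep]
      have hnext : LoopInv w h (a + 1) (w', h', g') := by
        refine ⟨p1, p2, p3, by rw [← hpw]; exact p6, by rw [← hph]; exact p7, ?_⟩
        intro j hj2 hja ⟨hjw, hjh⟩
        rcases lt_or_eq_of_le (by omega : j ≤ a) with hlt | hEq
        · exact hdvd j hj2 hlt ⟨hjw.trans p4, hjh.trans p5⟩
        · subst hEq; exact p8 ⟨hjw, hjh⟩
      rw [max_eq_right (le_of_lt hba')]
      have := ih (a + 1) b (w', h', g') (by omega) (by omega) hnext
      rwa [max_eq_right (by omega : a + 1 ≤ b)] at this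

theorem gcd_after_loop (w h : Int)
    (f : Int × Int × Int) (hf : LoopInv w h (min w h + 1) f) :
    (Int.gcd w h : Int) = f.2.2 := by
  obtain ⟨hw1, hh1, hg1, hpw, hph, hdvd⟩ := hf
  have hcop : Int.gcd f.1 f.2.1 = 1 := by
    by_contra hne
    have hpos : 0 < Int.gcd f.1 f.2.1 := Int.gcd_pos_of_ne_zero_left _ (by omega)
    have h2 : 2 ≤ (Int.gcd f.1 f.2.1 : Int) := by
      have := hpos; omega
    have hd1 : (Int.gcd f.1 f.2.1 : Int) ∣ f.1 := Int.gcd_dvd_left f.1 f.2.1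
    have hd2 : (Int.gcd f.1 f.2.1 : Int) ∣ f.2.1 := Int.gcd_dvd_right f.1 f.2.1
    have hle1 : (Int.gcd f.1 f.2.1 : Int) ≤ f.1 := Int.le_of_dvd (by omega) hd1
    have hle2 : (Int.gcd f.1 f.2.1 : Int) ≤ f.2.1 := Int.le_of_dvd (by omega) hd2
    have hfw : f.1 ≤ w := by nlinarith
    have hfh : f.2.1 ≤ h := by nlinarith
    exact hdvd _ h2 (by omega) ⟨hd1, hd2⟩
  have : Int.gcd w h = f.2.2.natAbs * Int.gcd f.1 f.2.1 := by
    rw [← hpw, ← hph]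
    exact Int.gcd_mul_left f.2.2 f.1 f.2.1
  rw [this, hcop, mul_one]
  exact Int.natAbs_of_nonneg (by omega : (0:Int) ≤ f.2.2)

-- ===== VERDICT (by name: the statement is the Claim_ definition above) =====
theorem solution_spec : Claim_equal_solution := by
  intro w h _
  unfold Spec_solution solution solution_alt
  by_cases hpos : 0 < w ∧ 0 < h
  · obtain ⟨hw, hh⟩ := hpos
    have hmin : 1 ≤ min w h := le_min hw hh
    have hinit : LoopInv w h 2 (w, h, 1) := by
      refine ⟨hw, hh, le_refl 1, one_mul w, one_mul h, ?_⟩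
      intro j hj2 hj hc
      omega
    have hfold := fold_inv w h (min w h + 1 - 2).toNat 2 (min w h + 1) (w, h, 1)
      (le_refl 2) (by omega) hinit
    rw [max_eq_right (by omega : (2:Int) ≤ min w h + 1)] at hfold
    set f := (PySem.List.pyRange 2 (min w h + 1) 1).foldl
        (fun (s : Int × Int × Int) k => solWhile k (s.1.natAbs + 1) s) (w, h, 1) with hfdef
    have hgcd : (Int.gcd w h : Int) = f.2.2 := gcd_after_loop w h f hfold
    have heuclid : euclid w h = (Int.gcd w h : Int) :=
      euclid_eq_gcd h.natAbs w h (le_refl _) (by omega) (by omega)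
    obtain ⟨hw1, hh1, hg1, hpw, hph, _⟩ := hfold
    have htrash : (f.1 + f.2.1 - 1) * f.2.2 = w + h - f.2.2 := by
      have e1 : f.2.2 * f.1 = w := hpw
      have e2 : f.2.2 * f.2.1 = h := hph
      nlinarith [e1, e2]
    show w * h - (f.1 + f.2.1 - 1) * f.2.2 =
      w * h - w - h + (if 0 < w ∧ 0 < h then euclid w h else 1)
    rw [if_pos ⟨hw, hh⟩, htrash, heuclid, ← hgcd]
    ring
  · have hmin : min w h + 1 ≤ 2 := by
      rcases not_and_or.mp hpos with hw | hh
      · have : min w h ≤ w := min_le_left w h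
        omega
      · have : min w h ≤ h := min_le_right w h
        omega
    rw [PySem.List.pyRange_one_eq_nil hmin, List.foldl_nil]
    show w * h - (w + h - 1) * 1 = w * h - w - h + (if 0 < w ∧ 0 < h then euclid w h else 1)
    rw [if_neg hpos]
    ring
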